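-- pv_equiv track=rewrite | github.com/qazedhq/qa-z | scripts/alpha_release_preflight_evidence.py | remote_ref_kind_summary
-- ===== SOURCE A (Python) =====
-- from typing import Sequence
--
-- def remote_ref_kind_summary(
--     ref_names: Sequence[str],
-- ) -> tuple[int, int, list[str]]:
--     head_count = sum(1 for name in ref_names if name.startswith("refs/heads/"))
--     tag_count = sum(1 for name in ref_names if name.startswith("refs/tags/"))
--     other_count = len(ref_names) - head_count - tag_count
--     ref_kinds: list[str] = []
--     if head_count:
--         ref_kinds.append("heads")
--     if tag_count:
--         ref_kinds.append("tags")
--     if other_count: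
--         ref_kinds.append("other")
--     return head_count, tag_count, ref_kinds
-- ===== SOURCE B (Python) =====
-- _KINDS = ("heads", "tags", "other")
--
-- def _classify(name):
--     if name.startswith("refs/heads/"):
--         return "heads"
--     if name.startswith("refs/tags/"):
--         return "tags"
--     return "other"
--
-- def remote_ref_kind_summary(ref_names):
--     counts = {}
--     for name in ref_names:
--         kind = _classify(name)
--         counts[kind] = counts.get(kind, 0) + 1
--     ref_kinds = [k for k in _KINDS if counts.get(k, 0)]
--     return counts.get("heads", 0), counts.get("tags", 0), ref_kinds
-- ===== Notes on version B (the rewrite author's own statement) =====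
-- stated objective: alternative
-- what changed: Replaces A's two generator-expression scans plus subtraction with a classify-then-tally design: each name is mapped to its kind label and tallied into a dict of counts built in one pass, from which the counts and the kind list are read off.
import Mathlib
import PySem

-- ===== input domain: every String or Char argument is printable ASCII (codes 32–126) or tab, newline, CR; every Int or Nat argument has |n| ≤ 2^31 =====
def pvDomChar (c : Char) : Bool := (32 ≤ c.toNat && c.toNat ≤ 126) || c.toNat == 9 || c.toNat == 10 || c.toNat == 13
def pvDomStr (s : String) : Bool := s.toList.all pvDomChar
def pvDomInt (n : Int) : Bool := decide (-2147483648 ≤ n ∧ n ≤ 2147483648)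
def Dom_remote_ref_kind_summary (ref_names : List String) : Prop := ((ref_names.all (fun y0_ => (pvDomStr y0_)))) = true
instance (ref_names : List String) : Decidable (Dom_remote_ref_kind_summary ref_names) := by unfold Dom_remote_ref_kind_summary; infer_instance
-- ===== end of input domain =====

-- ===== PORT A =====
-- B replaces A's two comprehension scans plus the subtraction-derived other_count with a
-- classify-then-tally pass into a dict of counts; return values are identical (alternative).
def remote_ref_kind_summary (ref_names : List String) : Int × Int × List String :=
  let head_count : Int :=
    ((ref_names.filter (fun name => PySem.Str.startswith name "refs/heads/")).map
      (fun _ => (1 : Int))).sum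
  let tag_count : Int :=
    ((ref_names.filter (fun name => PySem.Str.startswith name "refs/tags/")).map
      (fun _ => (1 : Int))).sum
  let other_count : Int := (ref_names.length : Int) - head_count - tag_count
  let ref_kinds : List String := []
  let ref_kinds := if head_count ≠ 0 then ref_kinds ++ ["heads"] else ref_kinds
  let ref_kinds := if tag_count ≠ 0 then ref_kinds ++ ["tags"] else ref_kinds
  let ref_kinds := if other_count ≠ 0 then ref_kinds ++ ["other"] else ref_kinds
  (head_count, tag_count, ref_kinds)

-- ===== PORT B =====
def pvClassify (name : String) : String :=
  if PySem.Str.startswith name "refs/heads/" then "heads"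
  else if PySem.Str.startswith name "refs/tags/" then "tags"
  else "other"

def remote_ref_kind_summary_alt (ref_names : List String) : Int × Int × List String :=
  let counts : PySem.Dict String Int :=
    ref_names.foldl
      (fun d name =>
        let kind := pvClassify name
        d.insert kind (d.getD kind 0 + 1))
      PySem.Dict.empty
  let ref_kinds : List String :=
    (["heads", "tags", "other"]).filter (fun k => decide (counts.getD k 0 ≠ 0))
  (counts.getD "heads" 0, counts.getD "tags" 0, ref_kinds)

-- ===== PRECONDITION & SPEC =====
def Spec_remote_ref_kind_summary (ref_names : List String) (out : Int × Int × List String) : Prop := out = remote_ref_kind_summary_alt ref_names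
instance (ref_names : List String) (out : Int × Int × List String) : Decidable (Spec_remote_ref_kind_summary ref_names out) := by unfold Spec_remote_ref_kind_summary; infer_instance

-- ===== CLAIM (what is proved, stated in full; the proofs are below) =====
def Claim_equal_remote_ref_kind_summary : Prop := ∀ (ref_names : List String), Dom_remote_ref_kind_summary ref_names → Spec_remote_ref_kind_summary ref_names (remote_ref_kind_summary ref_names)

-- ===== LEMMAS AND PROOFS =====

theorem tags_not_heads (s : String) (h : PySem.Str.startswith s "refs/tags/" = true) :
    PySem.Str.startswith s "refs/heads/" = false := by
  simp only [PySem.Str.startswith_eq] at *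
  rw [PySem.Chars.startswith_iff] at h
  obtain ⟨rest, hr⟩ := h
  have hs : s.toList = 'r'::'e'::'f'::'s'::'/'::'t'::'a'::'g'::'s'::'/'::rest := by
    simpa using hr.symm
  rw [hs]
  simp [PySem.Chars.startswith, List.isPrefixOf]

theorem heads_not_tags (s : String) (h : PySem.Str.startswith s "refs/heads/" = true) :
    PySem.Str.startswith s "refs/tags/" = false := by
  simp only [PySem.Str.startswith_eq] at *
  rw [PySem.Chars.startswith_iff] at h
  obtain ⟨rest, hr⟩ := h
  have hs : s.toList = 'r'::'e'::'f'::'s'::'/'::'h'::'e'::'a'::'d'::'s'::'/'::rest := by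
    simpa using hr.symm
  rw [hs]
  simp [PySem.Chars.startswith, List.isPrefixOf]

theorem sum_filter_eq_countP (l : List String) (p : String → Bool) :
    ((l.filter p).map (fun _ => (1 : Int))).sum = (l.countP p : Int) := by
  rw [List.countP_eq_length_filter]
  induction l.filter p with
  | nil => simp
  | cons x xs ih =>
    simp only [List.map_cons, List.sum_cons, List.length_cons, ih]
    push_cast
    ring

-- the tally for a kind label is the number of names classified to it
theorem countsD (l : List String) (v : String) :
    (l.foldl
      (fun d name => d.insert (pvClassify name) (d.getD (pvClassify name) 0 + 1))
      PySem.Dict.empty).getD v 0 = ((l.map pvClassify).count v : Int) := by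
  have key : ∀ (d : PySem.Dict String Int),
      (l.foldl
        (fun d name => d.insert (pvClassify name) (d.getD (pvClassify name) 0 + 1))
        d).getD v 0 = d.getD v 0 + ((l.map pvClassify).count v : Int) := by
    induction l with
    | nil => intro d; simp
    | cons x xs ih =>
      intro d
      simp only [List.foldl_cons, List.map_cons, List.count_cons, ih,
        PySem.Dict.getD_insert]
      by_cases hv : v = pvClassify x
      · simp [hv]; ring
      · have : (pvClassify x == v) = false := by simp [Ne.symm hv]
        simp [hv, this]
  rw [key PySem.Dict.empty]
  simp

theorem count_classify_heads (l : List String) :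
    (l.map pvClassify).count "heads"
      = l.countP (fun n => PySem.Str.startswith n "refs/heads/") := by
  rw [List.count_eq_countP, List.countP_map]
  apply List.countP_congr
  intro n _
  simp only [Function.comp_apply]
  unfold pvClassify
  split_ifs with h1 h2 <;> simp_all

theorem count_classify_tags (l : List String) :
    (l.map pvClassify).count "tags"
      = l.countP (fun n => PySem.Str.startswith n "refs/tags/") := by
  rw [List.count_eq_countP, List.countP_map]
  apply List.countP_congr
  intro n _
  simp only [Function.comp_apply]
  unfold pvClassify
  split_ifs with h1 h2
  · rw [heads_not_tags n h1]
    simp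
  · simp_all
  · simp_all

theorem count_classify_other (l : List String) :
    (l.map pvClassify).count "other"
      = l.countP (fun n => !PySem.Str.startswith n "refs/heads/" &&
          !PySem.Str.startswith n "refs/tags/") := by
  rw [List.count_eq_countP, List.countP_map]
  apply List.countP_congr
  intro n _
  simp only [Function.comp_apply]
  unfold pvClassify
  split_ifs with h1 h2 <;> simp_all

theorem countP_three_sum (p q : String → Bool) (l : List String) :
    l.countP p + l.countP (fun n => !p n && q n) +
      l.countP (fun n => !p n && !q n) = l.length := by
  induction l with
  | nil => simp
  | cons x xs ih =>
    simp only [List.countP_cons, List.length_cons]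
    by_cases hp : p x = true <;> by_cases hq : q x = true <;> simp_all <;> omega

theorem countP_tags_eq (l : List String) :
    l.countP (fun n => !PySem.Str.startswith n "refs/heads/" && PySem.Str.startswith n "refs/tags/") =
    l.countP (fun n => PySem.Str.startswith n "refs/tags/") := by
  apply List.countP_congr
  intro n _
  by_cases ht : PySem.Str.startswith n "refs/tags/" = true
  · rw [ht, tags_not_heads n ht]; simp
  · simp only [Bool.not_eq_true] at ht
    rw [ht]; simp

-- ===== VERDICT (by name: the statement is the Claim_ definition above) =====
theorem remote_ref_kind_summary_spec : Claim_equal_remote_ref_kind_summary := by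
  intro l _
  unfold Spec_remote_ref_kind_summary remote_ref_kind_summary remote_ref_kind_summary_alt
  simp only [countsD, count_classify_heads, count_classify_tags, count_classify_other,
    sum_filter_eq_countP, List.filter]
  have h3 := countP_three_sum (fun n => PySem.Str.startswith n "refs/heads/")
    (fun n => PySem.Str.startswith n "refs/tags/") l
  rw [countP_tags_eq] at h3
  have ho : (l.length : Int)
      - (l.countP (fun n => PySem.Str.startswith n "refs/heads/") : Int)
      - (l.countP (fun n => PySem.Str.startswith n "refs/tags/") : Int)
      = (l.countP (fun n => !PySem.Str.startswith n "refs/heads/" &&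
          !PySem.Str.startswith n "refs/tags/") : Int) := by
    omega
  rw [ho]
  set a := l.countP (fun n => PySem.Str.startswith n "refs/heads/")
  set b := l.countP (fun n => PySem.Str.startswith n "refs/tags/")
  set c := l.countP (fun n => !PySem.Str.startswith n "refs/heads/" &&
      !PySem.Str.startswith n "refs/tags/")
  by_cases ha : a = 0 <;> by_cases hb : b = 0 <;> by_cases hc : c = 0 <;>
    simp [ha, hb, hc]
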